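-- pv_equiv track=rewrite | github.com/Hulyamr13/hackerrank | Jim and the Jokes.py | solve
-- ===== SOURCE A (Python) =====
-- def to_dec(base, n):
--     ans = 0
--     power = 1
--     for i in reversed(n):
--         if int(i) >= base:
--             return -1
--         ans += int(i) * power
--         power *= base
--     return ans
--
-- def solve(dates):
--     events = {}
--     for date in dates:
--         base, day = date
--         p = to_dec(base, str(day))
--         if p != -1:
--             events[p] = events.get(p, 0) + 1
--
--     ans = 0
--     for i in events.values():
--         ans += (i * (i - 1) // 2)
--     return ans
-- ===== SOURCE B (Python) =====
-- def to_dec(base, n):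
--     ans = 0
--     power = 1
--     for i in reversed(n):
--         if int(i) >= base:
--             return -1
--         ans += int(i) * power
--         power *= base
--     return ans
--
-- def solve(dates):
--     events = {}
--     ans = 0
--     for base, day in dates:
--         p = to_dec(base, str(day))
--         if p != -1:
--             c = events.get(p, 0)
--             ans += c
--             events[p] = c + 1
--     return ans
-- ===== Notes on version B (the rewrite author's own statement) =====
-- stated objective: alternative
-- what changed: solve is fused into a single pass that accumulates colliding pairs incrementally (ans += current count of this value before incrementing it), so there is no second loop over the counter and no i*(i-1)//2 closed form
import Mathlib
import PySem

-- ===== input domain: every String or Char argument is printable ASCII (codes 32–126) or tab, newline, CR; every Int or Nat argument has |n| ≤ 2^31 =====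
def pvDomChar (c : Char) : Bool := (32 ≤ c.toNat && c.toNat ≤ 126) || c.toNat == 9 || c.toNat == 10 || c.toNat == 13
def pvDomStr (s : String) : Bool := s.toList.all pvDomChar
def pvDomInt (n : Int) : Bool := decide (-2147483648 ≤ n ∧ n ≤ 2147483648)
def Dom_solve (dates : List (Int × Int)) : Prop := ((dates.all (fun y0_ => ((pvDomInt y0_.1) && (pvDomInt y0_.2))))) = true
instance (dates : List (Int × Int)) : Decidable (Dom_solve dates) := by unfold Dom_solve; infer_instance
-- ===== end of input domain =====

-- B fuses A's two loops into one pass that accumulates colliding pairs incrementally; equal cost, different decomposition.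

-- ===== PORT A =====
-- to_dec: loop over reversed(str(day)) with state (ans, power).
-- int(i) is ported as c.toNat - 48, exact on digit characters; Pre_solve excludes
-- exactly the inputs where the loop would reach the '-' of a negative day (Python: ValueError).
def toDecGo (base : Int) : List Char → Int → Int → Int
  | [], ans, _ => ans
  | c :: rest, ans, power =>
      let d : Int := (c.toNat : Int) - 48
      if base ≤ d then -1
      else toDecGo base rest (ans + d * power) (power * base)

def toDec (base : Int) (n : List Char) : Int := toDecGo base n.reverse 0 1

def solve (dates : List (Int × Int)) : Int :=
  let events := dates.foldl (fun (ev : PySem.Dict Int Int) date =>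
      let p := toDec date.1 (PySem.Int.toChars date.2)
      if p ≠ -1 then ev.insert p (ev.getD p 0 + 1) else ev) PySem.Dict.empty
  events.values.foldl (fun ans i => ans + PySem.Int.floordiv (i * (i - 1)) 2) 0

-- ===== PORT B =====
def solve_alt (dates : List (Int × Int)) : Int :=
  (dates.foldl (fun (st : PySem.Dict Int Int × Int) date =>
      let p := toDec date.1 (PySem.Int.toChars date.2)
      if p ≠ -1 then
        let c := st.1.getD p 0
        (st.1.insert p (c + 1), st.2 + c)
      else st) (PySem.Dict.empty, 0)).2

-- ===== PRECONDITION & SPEC =====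
-- Pre_solve excludes exactly the inputs where Python's to_dec raises ValueError on int('-'):
-- a negative day all of whose decimal digits are < base (so the scan reaches the '-').
def Pre_solve (dates : List (Int × Int)) : Prop :=
  (dates.all (fun d => decide (0 ≤ d.2) ||
      (PySem.Int.toChars (-d.2)).any (fun c => decide (d.1 ≤ (c.toNat : Int) - 48)))) = true
instance (dates : List (Int × Int)) : Decidable (Pre_solve dates) := by unfold Pre_solve; infer_instance

def pvWitness_solve : (List (Int × Int)) := [(2, 10), (2, 10), (10, 3), (2, -5)]

def Spec_solve (dates : List (Int × Int)) (out : Int) : Prop := out = solve_alt dates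
instance (dates : List (Int × Int)) (out : Int) : Decidable (Spec_solve dates out) := by unfold Spec_solve; infer_instance

-- ===== CLAIM (what is proved, stated in full; the proofs are below) =====
def Claim_equal_solve : Prop := ∀ (dates : List (Int × Int)), Dom_solve dates → Pre_solve dates → Spec_solve dates (solve dates)

-- ===== LEMMAS AND PROOFS =====
def C2 (i : Int) : Int := PySem.Int.floordiv (i * (i - 1)) 2

-- let-free forms of the two loop bodies (definitionally equal to the port lambdas)
def stepA (ev : PySem.Dict Int Int) (date : Int × Int) : PySem.Dict Int Int :=
  if toDec date.1 (PySem.Int.toChars date.2) ≠ -1 then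
    ev.insert (toDec date.1 (PySem.Int.toChars date.2))
      (ev.getD (toDec date.1 (PySem.Int.toChars date.2)) 0 + 1)
  else ev

def stepB (st : PySem.Dict Int Int × Int) (date : Int × Int) : PySem.Dict Int Int × Int :=
  if toDec date.1 (PySem.Int.toChars date.2) ≠ -1 then
    (st.1.insert (toDec date.1 (PySem.Int.toChars date.2))
        (st.1.getD (toDec date.1 (PySem.Int.toChars date.2)) 0 + 1),
     st.2 + st.1.getD (toDec date.1 (PySem.Int.toChars date.2)) 0)
  else st

theorem C2_succ (c : Int) : C2 (c + 1) = C2 c + c := by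
  unfold C2
  rw [PySem.Int.floordiv_eq_ediv_of_pos (by norm_num : (0:Int) < 2),
      PySem.Int.floordiv_eq_ediv_of_pos (by norm_num : (0:Int) < 2)]
  have h : (c + 1) * (c + 1 - 1) = c * (c - 1) + c * 2 := by ring
  rw [h, Int.add_mul_ediv_right _ _ (by norm_num : (2:Int) ≠ 0)]

theorem sum_map_update (p x : Int) (g : Int → Int) :
    ∀ (l : List Int), l.Nodup → p ∈ l →
      (l.map (fun k => if k = p then x else g k)).sum = (l.map g).sum + x - g p := by
  intro l
  induction l with
  | nil => intro _ h; cases h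
  | cons a l ih =>
    intro hnd hmem
    rcases List.nodup_cons.mp hnd with ⟨hna, hnd'⟩
    rcases List.mem_cons.mp hmem with rfl | hmem'
    · have : (l.map (fun k => if k = p then x else g k)) = l.map g := by
        apply List.map_congr_left
        intro k hk
        have : k ≠ p := fun h => hna (h ▸ hk)
        simp [this]
      simp [this]; ring
    · have hap : a ≠ p := fun h => by
        subst h; exact absurd hmem' hna
      simp only [List.map_cons, List.sum_cons, if_neg hap, ih hnd' hmem']
      ring

theorem sumC2_insert (d : PySem.Dict Int Int) (hnd : d.keys.Nodup) (p : Int) :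
    (((d.insert p (d.getD p 0 + 1)).values).map C2).sum
      = ((d.values).map C2).sum + d.getD p 0 := by
  have hnd' : (d.insert p (d.getD p 0 + 1)).keys.Nodup := PySem.Dict.nodup_keys_insert d _ _ hnd
  rw [PySem.Dict.values_eq_map_keys d hnd 0,
      PySem.Dict.values_eq_map_keys _ hnd' 0]
  by_cases hc : d.contains p = true
  · -- existing key: keys unchanged, value at p bumped
    rw [PySem.Dict.keys_insert_of_contains d _ hc]
    have hmem : p ∈ d.keys := (PySem.Dict.contains_iff_mem_keys d p).mp hc
    have hmap : (d.keys.map (C2 ∘ fun k => (d.insert p (d.getD p 0 + 1)).getD k 0))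
        = d.keys.map (fun k => if k = p then C2 (d.getD p 0 + 1) else C2 (d.getD k 0)) := by
      apply List.map_congr_left
      intro k _
      simp only [Function.comp_apply, PySem.Dict.getD_insert]
      by_cases hkp : k = p <;> simp [hkp]
    rw [List.map_map, List.map_map, hmap,
        sum_map_update p _ (fun k => C2 (d.getD k 0)) d.keys hnd hmem, C2_succ]
    simp only [Function.comp_def]
    ring
  · -- fresh key: keys extended with p, new count 1, C2 1 = 0, old count 0
    have hc' : d.contains p = false := Bool.not_eq_true _ ▸ (by simpa using hc)
    have hget : d.getD p 0 = 0 := PySem.Dict.getD_of_not_contains d 0 hc'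
    have hnp : p ∉ d.keys := fun h => by
      rw [(PySem.Dict.contains_iff_mem_keys d p).mpr h] at hc'; cases hc'
    rw [PySem.Dict.keys_insert_of_not_contains d _ hc']
    rw [List.map_map, List.map_map, List.map_append, List.sum_append]
    have hmap : (d.keys.map (C2 ∘ fun k => (d.insert p (d.getD p 0 + 1)).getD k 0))
        = d.keys.map (C2 ∘ fun k => d.getD k 0) := by
      apply List.map_congr_left
      intro k hk
      have hkp : k ≠ p := fun h => hnp (h ▸ hk)
      simp only [Function.comp_apply, PySem.Dict.getD_insert, if_neg hkp]
    have hC21 : C2 1 = 0 := by decide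
    rw [hmap, hget]
    simp only [List.map_cons, List.map_nil, List.sum_cons, List.sum_nil, Function.comp_apply,
      PySem.Dict.getD_insert, if_true, zero_add, hC21, add_zero]

-- the loop invariant relating B's fused pass to A's dict-building pass
theorem fused_invariant :
    ∀ (dates : List (Int × Int)) (d : PySem.Dict Int Int) (ans : Int), d.keys.Nodup →
      (dates.foldl stepB (d, ans)).2
        = ans + (((dates.foldl stepA d).values).map C2).sum - ((d.values).map C2).sum := by
  intro dates
  induction dates with
  | nil => intro d ans _; simp
  | cons date rest ih =>
    intro d ans hnd
    simp only [List.foldl_cons]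
    by_cases hp : toDec date.1 (PySem.Int.toChars date.2) ≠ -1
    · have hB : stepB (d, ans) date
          = (d.insert (toDec date.1 (PySem.Int.toChars date.2))
              (d.getD (toDec date.1 (PySem.Int.toChars date.2)) 0 + 1),
             ans + d.getD (toDec date.1 (PySem.Int.toChars date.2)) 0) := by
        simp [stepB, hp]
      have hA : stepA d date
          = d.insert (toDec date.1 (PySem.Int.toChars date.2))
              (d.getD (toDec date.1 (PySem.Int.toChars date.2)) 0 + 1) := by
        simp [stepA, hp]
      rw [hB, hA, ih _ _ (PySem.Dict.nodup_keys_insert d _ _ hnd), sumC2_insert d hnd]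
      ring
    · have hB : stepB (d, ans) date = (d, ans) := by simp [stepB, hp]
      have hA : stepA d date = d := by simp [stepA, hp]
      rw [hB, hA]
      exact ih d ans hnd

-- ===== VERDICT (by name: the statement is the Claim_ definition above) =====
theorem solve_spec : Claim_equal_solve := by
  intro dates _ _
  show (List.foldl (fun ans i => ans + C2 i) 0 (dates.foldl stepA PySem.Dict.empty).values)
      = (dates.foldl stepB (PySem.Dict.empty, 0)).2
  rw [fused_invariant dates PySem.Dict.empty 0 PySem.Dict.nodup_keys_empty,
      PySem.List.foldl_add _ C2 0]
  simp [PySem.Dict.empty, PySem.Dict.values]
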